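-- pv_equiv track=rewrite | github.com/Samie-mirghani/insider-cluster-watch | scripts/analyzers/filter_analyzer.py | _find_key_rejection
-- ===== SOURCE A (Python) =====
-- def _find_key_rejection(rejections):
--     """
--     Identify most significant rejection.
--
--     Args:
--         rejections: List of rejection reasons
--
--     Returns:
--         dict or None: Key rejection info
--     """
--     if not rejections:
--         return None
--
--     # Prioritize go-private > downtrend > cooldown > micro-cap
--     for r in rejections:
--         if 'go-private' in r.lower() or 'likely' in r.lower():
--             return {'reason': 'go-private', 'impact': 'prevented false positive'}
--
--     for r in rejections:
--         if 'downtrend' in r.lower():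
--             return {'reason': 'downtrend', 'impact': 'likely saved loss'}
--
--     return {'reason': 'various', 'impact': 'maintained quality'}
-- ===== SOURCE B (Python) =====
-- def _find_key_rejection(rejections):
--     """Single flag-tracking pass instead of two separate scans."""
--     if not rejections:
--         return None
--     saw_downtrend = False
--     for r in rejections:
--         rl = r.lower()
--         if 'go-private' in rl or 'likely' in rl:
--             return {'reason': 'go-private', 'impact': 'prevented false positive'}
--         if 'downtrend' in rl:
--             saw_downtrend = True
--     if saw_downtrend:
--         return {'reason': 'downtrend', 'impact': 'likely saved loss'}
--     return {'reason': 'various', 'impact': 'maintained quality'}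
-- ===== Notes on version B (the rewrite author's own statement) =====
-- stated objective: simpler
-- what changed: Replaces A's two full scans (go-private scan, then downtrend scan) with a single pass that returns go-private on sight and tracks a saw_downtrend flag, deciding downtrend-vs-various after the loop.
import Mathlib
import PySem

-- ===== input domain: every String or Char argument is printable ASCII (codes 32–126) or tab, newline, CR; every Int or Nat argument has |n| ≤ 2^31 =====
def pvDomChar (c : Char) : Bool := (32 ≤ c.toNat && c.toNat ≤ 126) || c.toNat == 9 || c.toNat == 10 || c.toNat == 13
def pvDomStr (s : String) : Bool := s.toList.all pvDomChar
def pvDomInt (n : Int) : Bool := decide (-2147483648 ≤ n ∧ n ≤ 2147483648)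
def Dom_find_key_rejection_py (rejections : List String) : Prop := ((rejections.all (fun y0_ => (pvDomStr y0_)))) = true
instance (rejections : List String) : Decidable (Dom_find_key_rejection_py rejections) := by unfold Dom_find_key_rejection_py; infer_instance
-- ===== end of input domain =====

-- B collapses A's two separate scans into one flag-tracking pass (objective: simpler).

-- the three result dicts
def gpDict : List (String × String) := [("reason", "go-private"), ("impact", "prevented false positive")]
def dtDict : List (String × String) := [("reason", "downtrend"), ("impact", "likely saved loss")]
def vaDict : List (String × String) := [("reason", "various"), ("impact", "maintained quality")]

-- ===== PORT A =====
-- 'go-private' in r.lower() or 'likely' in r.lower()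
def gpPred (r : String) : Bool :=
  PySem.Str.isIn "go-private" (PySem.Str.lower r) || PySem.Str.isIn "likely" (PySem.Str.lower r)
-- 'downtrend' in r.lower()
def dtPred (r : String) : Bool := PySem.Str.isIn "downtrend" (PySem.Str.lower r)

-- first for-loop of A (early return)
def aLoop1 : List String → Option (List (String × String))
  | [] => none
  | r :: rest => if gpPred r then some gpDict else aLoop1 rest

-- second for-loop of A, falling through to the final return
def aLoop2 : List String → List (String × String)
  | [] => vaDict
  | r :: rest => if dtPred r then dtDict else aLoop2 rest

def find_key_rejection_py (rejections : List String) : Option (List (String × String)) :=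
  if rejections.isEmpty then none
  else
    match aLoop1 rejections with
    | some d => some d
    | none => some (aLoop2 rejections)

-- ===== PORT B =====
-- single pass: return go-private immediately, remember whether a downtrend reason was seen
def bLoop : List String → Bool → Option (List (String × String))
  | [], saw => if saw then some dtDict else some vaDict
  | r :: rest, saw =>
      if gpPred r then some gpDict else bLoop rest (saw || dtPred r)

def find_key_rejection_py_alt (rejections : List String) : Option (List (String × String)) :=
  if rejections.isEmpty then none
  else bLoop rejections false

-- ===== PRECONDITION & SPEC =====
def Spec_find_key_rejection_py (rejections : List String) (out : Option (List (String × String))) : Prop := out = find_key_rejection_py_alt rejections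
instance (rejections : List String) (out : Option (List (String × String))) : Decidable (Spec_find_key_rejection_py rejections out) := by unfold Spec_find_key_rejection_py; infer_instance

-- ===== CLAIM (what is proved, stated in full; the proofs are below) =====
def Claim_equal_find_key_rejection_py : Prop := ∀ (rejections : List String), Dom_find_key_rejection_py rejections → Spec_find_key_rejection_py rejections (find_key_rejection_py rejections)

-- ===== LEMMAS AND PROOFS =====

-- B's loop, started with flag `saw`, equals A's composition of the two scans
-- (with the flag pre-seeding the downtrend decision).
theorem bLoop_eq (xs : List String) : ∀ saw : Bool,
    bLoop xs saw =
      match aLoop1 xs with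
      | some d => some d
      | none => some (if saw then dtDict else aLoop2 xs) := by
  induction xs with
  | nil => intro saw; cases saw <;> simp [bLoop, aLoop1, aLoop2]
  | cons r rest ih =>
      intro saw
      by_cases hg : gpPred r
      · simp [bLoop, aLoop1, hg]
      · by_cases hd : dtPred r
        · simp [bLoop, aLoop1, aLoop2, hg, hd, ih true]
        · simp [bLoop, aLoop1, aLoop2, hg, hd, ih saw]

-- ===== VERDICT (by name: the statement is the Claim_ definition above) =====
theorem find_key_rejection_py_spec : Claim_equal_find_key_rejection_py := by
  intro rejections _
  unfold Spec_find_key_rejection_py find_key_rejection_py find_key_rejection_py_alt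
  by_cases h : rejections.isEmpty
  · simp [h]
  · simp [h, bLoop_eq rejections false]
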